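-- pv_equiv track=rewrite | github.com/Inkmortal/LittleGPTracker-RG-Nano-Audio-In-Sampling | tools/root_detection_accuracy_audit.py | contains_token
-- ===== SOURCE A (Python) =====
-- def is_boundary(ch: str) -> bool:
--     return not ch or not ch.isalnum()
--
-- def contains_token(name: str, token: str) -> bool:
--     lower = name.lower()
--     token = token.lower()
--     start = 0
--     while True:
--         idx = lower.find(token, start)
--         if idx < 0:
--             return False
--         before = lower[idx - 1] if idx > 0 else ""
--         after_idx = idx + len(token)
--         after = lower[after_idx] if after_idx < len(lower) else ""
--         if is_boundary(before) and is_boundary(after):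
--             return True
--         start = idx + 1
-- ===== SOURCE B (Python) =====
-- def contains_token(name: str, token: str) -> bool:
--     lower = name.lower()
--     token = token.lower()
--     n, m = len(lower), len(token)
--     return any(
--         lower[i:i + m] == token
--         and (i == 0 or not lower[i - 1].isalnum())
--         and (i + m == n or not lower[i + m].isalnum())
--         for i in range(n - m + 1)
--     )
-- ===== Notes on version B (the rewrite author's own statement) =====
-- stated objective: simpler
-- what changed: A's find-and-restart while-loop with index bookkeeping is replaced by a single any() expression that scans every candidate position once, comparing the slice and the two boundary characters directly.
import Mathlib
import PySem

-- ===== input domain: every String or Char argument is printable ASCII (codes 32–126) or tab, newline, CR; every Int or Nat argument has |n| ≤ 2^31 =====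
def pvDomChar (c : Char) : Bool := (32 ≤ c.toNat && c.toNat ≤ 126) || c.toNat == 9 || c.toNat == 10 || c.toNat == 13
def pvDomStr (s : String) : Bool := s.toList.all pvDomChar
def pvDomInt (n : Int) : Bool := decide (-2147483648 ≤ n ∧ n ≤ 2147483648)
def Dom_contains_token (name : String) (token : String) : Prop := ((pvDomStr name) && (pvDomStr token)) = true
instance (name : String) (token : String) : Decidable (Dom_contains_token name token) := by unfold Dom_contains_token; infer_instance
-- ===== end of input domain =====

-- B replaces A's find-and-restart while-loop by a single exhaustive any() scan over all candidate
-- positions (slice comparison + boundary tests); same results, a plainer one-expression decomposition.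

-- ===== PORT A =====
-- is_boundary(ch): ch is "" or a single character, modelled as a List Char of length ≤ 1
def pvIsBoundary (ch : List Char) : Bool := ch == [] || !(PySem.Chars.strIsalnum ch)

-- A's `while True` loop; fuel only makes the same computation total (start strictly increases
-- each pass and find returns -1 once start exceeds the length, so length+2 passes always suffice).
-- The `.elim [] ([·])` renders Python's 1-character string indexing; the guards `0 < idx` /
-- `afterIdx < len` are A's own, so the `none` branch of pyGet? is unreachable.
def pvFindLoop (lower tok : List Char) : Nat → Int → Bool
  | 0, _ => false
  | fuel+1, start =>
    let idx := PySem.Chars.findFrom lower tok start none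
    if idx < 0 then false
    else
      let before : List Char := if 0 < idx then ((PySem.List.pyGet? lower (idx - 1)).elim [] ([·])) else []
      let afterIdx : Int := idx + (tok.length : Int)
      let after : List Char := if afterIdx < (lower.length : Int) then ((PySem.List.pyGet? lower afterIdx).elim [] ([·])) else []
      if pvIsBoundary before && pvIsBoundary after then true
      else pvFindLoop lower tok fuel (idx + 1)

def contains_token (name : String) (token : String) : Bool :=
  let lower := PySem.Chars.lower name.toList
  let tok := PySem.Chars.lower token.toList
  pvFindLoop lower tok (lower.length + 2) 0

-- ===== PORT B =====
def contains_token_alt (name : String) (token : String) : Bool :=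
  let lower := PySem.Chars.lower name.toList
  let tok := PySem.Chars.lower token.toList
  let n : Int := (lower.length : Int)
  let m : Int := (tok.length : Int)
  (PySem.List.pyRange 0 (n - m + 1) 1).any fun i =>
    (PySem.List.slice lower (some i) (some (i + m)) == tok)
    && ((i == 0) || !(PySem.Chars.strIsalnum ((PySem.List.pyGet? lower (i - 1)).elim [] ([·]))))
    && ((i + m == n) || !(PySem.Chars.strIsalnum ((PySem.List.pyGet? lower (i + m)).elim [] ([·]))))

-- ===== PRECONDITION & SPEC =====
def Spec_contains_token (name : String) (token : String) (out : Bool) : Prop := out = contains_token_alt name token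
instance (name : String) (token : String) (out : Bool) : Decidable (Spec_contains_token name token out) := by unfold Spec_contains_token; infer_instance

-- ===== CLAIM (what is proved, stated in full; the proofs are below) =====
def Claim_equal_contains_token : Prop := ∀ (name : String) (token : String), Dom_contains_token name token → Spec_contains_token name token (contains_token name token)

-- ===== LEMMAS AND PROOFS =====

-- "position i is a whole-word occurrence of tok in lower"
def pvOk (lower tok : List Char) (i : Nat) : Bool :=
  decide (tok <+: lower.drop i)
  && (((i : Int) == 0) || !(PySem.Chars.strIsalnum ((PySem.List.pyGet? lower ((i : Int) - 1)).elim [] ([·]))))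
  && (((i : Int) + (tok.length : Int) == (lower.length : Int)) || !(PySem.Chars.strIsalnum ((PySem.List.pyGet? lower ((i : Int) + (tok.length : Int))).elim [] ([·]))))

def pvQ (lower tok : List Char) : Prop :=
  ∃ i : Nat, i + tok.length ≤ lower.length ∧ pvOk lower tok i = true

lemma pvSlice_eq_tok_iff (lower tok : List Char) (i : Nat) :
    PySem.List.slice lower (some (i : Int)) (some ((i : Int) + (tok.length : Int))) = tok ↔
      tok <+: lower.drop i := by
  have hcast : (i : Int) + (tok.length : Int) = ((i + tok.length : Nat) : Int) := by push_cast; ring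
  rw [hcast, PySem.List.slice_natCast]
  have h2 : i + tok.length - i = tok.length := by omega
  rw [h2]
  constructor
  · intro h; exact h ▸ List.take_prefix _ _
  · intro h; exact (List.prefix_iff_eq_take.mp h).symm

lemma pvAlt_iff (name token : String) :
    contains_token_alt name token = true ↔
      pvQ (PySem.Chars.lower name.toList) (PySem.Chars.lower token.toList) := by
  set lower := PySem.Chars.lower name.toList with hl
  set tok := PySem.Chars.lower token.toList with ht
  simp only [contains_token_alt, List.any_eq_true, ← hl, ← ht]
  constructor
  · rintro ⟨i, hmem, hp⟩
    rw [PySem.List.mem_pyRange_one] at hmem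
    obtain ⟨h0, hlt⟩ := hmem
    refine ⟨i.toNat, by omega, ?_⟩
    have hi : (i.toNat : Int) = i := Int.toNat_of_nonneg h0
    unfold pvOk
    rw [hi]
    simp only [Bool.and_eq_true, beq_iff_eq] at hp ⊢
    refine ⟨⟨?_, hp.1.2⟩, hp.2⟩
    rw [decide_eq_true_iff, ← pvSlice_eq_tok_iff lower tok i.toNat, hi]
    exact hp.1.1
  · rintro ⟨j, hjm, hok⟩
    refine ⟨(j : Int), ?_, ?_⟩
    · rw [PySem.List.mem_pyRange_one]; constructor <;> omega
    · unfold pvOk at hok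
      simp only [Bool.and_eq_true, beq_iff_eq, decide_eq_true_eq] at hok ⊢
      exact ⟨⟨(pvSlice_eq_tok_iff lower tok j).mpr hok.1.1, hok.1.2⟩, hok.2⟩

lemma pvFindFrom_past (s sub : List Char) (k : Int) (h : (s.length : Int) < k) :
    PySem.Chars.findFrom s sub k none = -1 := by
  simp only [PySem.Chars.findFrom]
  have h0 : ¬ k < 0 := by omega
  simp [h0, h]

lemma pvCond_eq (lower tok : List Char) (j : Nat) (hpre : tok <+: lower.drop j)
    (hjm : j + tok.length ≤ lower.length) :
    (pvIsBoundary (if 0 < (j : Int) then ((PySem.List.pyGet? lower ((j : Int) - 1)).elim [] ([·])) else []) &&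
     pvIsBoundary (if (j : Int) + (tok.length : Int) < (lower.length : Int) then ((PySem.List.pyGet? lower ((j : Int) + (tok.length : Int))).elim [] ([·])) else [])) =
      pvOk lower tok j := by
  unfold pvOk
  simp only [hpre, decide_true, Bool.true_and]
  congr 1
  · by_cases hj : j = 0
    · subst hj; simp [pvIsBoundary]
    · have hpos : 0 < (j : Int) := by exact_mod_cast Nat.pos_of_ne_zero hj
      rw [if_pos hpos]
      have hc : (j : Int) - 1 = ((j - 1 : Nat) : Int) := by omega
      have hlt : j - 1 < lower.length := by omega
      rw [hc, PySem.List.pyGet?_natCast]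
      simp [List.getElem?_eq_getElem hlt, pvIsBoundary, hj]
  · by_cases he : j + tok.length = lower.length
    · have hnl : ¬ ((j : Int) + (tok.length : Int) < (lower.length : Int)) := by omega
      rw [if_neg hnl]
      simp [pvIsBoundary]
      omega
    · have hlt : j + tok.length < lower.length := by omega
      have hlt' : ((j : Int) + (tok.length : Int) < (lower.length : Int)) := by exact_mod_cast hlt
      rw [if_pos hlt']
      have hc : (j : Int) + (tok.length : Int) = ((j + tok.length : Nat) : Int) := by push_cast; ring
      rw [hc, PySem.List.pyGet?_natCast]
      simp [List.getElem?_eq_getElem hlt, pvIsBoundary]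
      intro h; exact absurd h (by omega)

lemma pvLoop_iff (lower tok : List Char) : ∀ (fuel k : Nat),
    lower.length + 2 ≤ fuel + k →
    (pvFindLoop lower tok fuel (k : Int) = true ↔
      ∃ i : Nat, k ≤ i ∧ i + tok.length ≤ lower.length ∧ pvOk lower tok i = true) := by
  intro fuel
  induction fuel with
  | zero =>
    intro k hk
    simp only [pvFindLoop]
    constructor
    · intro h; exact absurd h (by simp)
    · rintro ⟨i, hki, him, _⟩; exfalso; omega
  | succ fuel ih =>
    intro k hk
    by_cases hkn : k ≤ lower.length
    · have hf := PySem.Chars.findFrom_natCast lower tok k hkn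
      by_cases hneg : PySem.Chars.find (lower.drop k) tok = -1
      · -- no occurrence at or after k
        have hno : ¬ tok <:+: lower.drop k := (PySem.Chars.find_eq_neg_one_iff _ _).mp hneg
        rw [hneg, if_pos rfl] at hf
        simp only [pvFindLoop, hf]
        constructor
        · intro h; exact absurd h (by simp)
        · rintro ⟨i, hki, him, hok⟩
          exfalso
          have hpre : tok <+: lower.drop i := by
            unfold pvOk at hok
            simp only [Bool.and_eq_true, decide_eq_true_eq] at hok
            exact hok.1.1
          have hdd : lower.drop i = (lower.drop k).drop (i - k) := by
            rw [List.drop_drop]; congr 1; omega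
          rw [hdd] at hpre
          exact hno (hpre.isInfix.trans (List.drop_suffix _ _).isInfix)
      · have hge : 0 ≤ PySem.Chars.find (lower.drop k) tok := by
          have := PySem.Chars.neg_one_le_find (lower.drop k) tok
          omega
        set f := PySem.Chars.find (lower.drop k) tok with hfdef
        have hspec := PySem.Chars.find_spec hge
        obtain ⟨hpre0, hmin⟩ := hspec
        have hflen : f ≤ (lower.drop k).length := PySem.Chars.find_le_length _ _
        rw [if_neg hneg] at hf
        set j : Nat := k + f.toNat with hjdef
        have hjcast : (k : Int) + f = ((j : Nat) : Int) := by
          rw [hjdef]; push_cast; omega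
        have hpre : tok <+: lower.drop j := by
          have : (lower.drop k).drop f.toNat = lower.drop j := by
            rw [List.drop_drop, hjdef]
          rwa [this] at hpre0
        have hjm : j + tok.length ≤ lower.length := by
          have h1 := hpre.length_le
          rw [List.length_drop] at h1
          have h2 : f.toNat ≤ lower.length - k := by
            have h3 := hflen
            rw [List.length_drop] at h3
            omega
          omega
        have hknj : k ≤ j := by omega
        -- unfold one step of the loop
        rw [show pvFindLoop lower tok (fuel+1) (k : Int) =
              (if PySem.Chars.findFrom lower tok (k : Int) none < 0 then false
               else
                 let idx := PySem.Chars.findFrom lower tok (k : Int) none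
                 let before : List Char := if 0 < idx then ((PySem.List.pyGet? lower (idx - 1)).elim [] ([·])) else []
                 let afterIdx : Int := idx + (tok.length : Int)
                 let after : List Char := if afterIdx < (lower.length : Int) then ((PySem.List.pyGet? lower afterIdx).elim [] ([·])) else []
                 if pvIsBoundary before && pvIsBoundary after then true
                 else pvFindLoop lower tok fuel (idx + 1)) from by
            simp only [pvFindLoop]]
        rw [hf, hjcast]
        have hjnn : ¬ (((j : Nat) : Int) < 0) := by omega
        rw [if_neg hjnn]
        show (if pvIsBoundary (if 0 < ((j : Nat) : Int) then ((PySem.List.pyGet? lower (((j : Nat) : Int) - 1)).elim [] ([·])) else []) &&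
                 pvIsBoundary (if ((j : Nat) : Int) + (tok.length : Int) < (lower.length : Int) then ((PySem.List.pyGet? lower (((j : Nat) : Int) + (tok.length : Int))).elim [] ([·])) else [])
              then true else pvFindLoop lower tok fuel (((j : Nat) : Int) + 1)) = true ↔ _
        rw [pvCond_eq lower tok j hpre hjm]
        by_cases hC : pvOk lower tok j = true
        · simp only [hC, if_true, true_iff]
          exact ⟨j, hknj, hjm, hC⟩
        · have hC' : pvOk lower tok j = false := by
            cases hb : pvOk lower tok j
            · rfl
            · exact absurd hb hC
          simp only [hC', Bool.false_eq_true, if_false]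
          have hc1 : ((j : Nat) : Int) + 1 = (((j + 1 : Nat)) : Int) := by push_cast; ring
          rw [hc1, ih (j+1) (by omega)]
          constructor
          · rintro ⟨i, h1, h2, h3⟩
            exact ⟨i, by omega, h2, h3⟩
          · rintro ⟨i, h1, h2, h3⟩
            refine ⟨i, ?_, h2, h3⟩
            by_contra hlt2
            push Not at hlt2
            rcases Nat.lt_or_ge i j with hij | hij
            · have hik : i - k < f.toNat := by omega
              have hm := hmin (i - k) hik
              have hdd : (lower.drop k).drop (i - k) = lower.drop i := by
                rw [List.drop_drop]
                congr 1
                omega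
              rw [hdd] at hm
              unfold pvOk at h3
              simp only [Bool.and_eq_true, decide_eq_true_eq] at h3
              exact hm h3.1.1
            · have : i = j := by omega
              rw [this, hC'] at h3
              exact absurd h3 (by simp)
    · -- k past the end: find returns -1
      have hpast : PySem.Chars.findFrom lower tok (k : Int) none = -1 :=
        pvFindFrom_past _ _ _ (by exact_mod_cast by omega : (lower.length : Int) < (k : Int))
      simp only [pvFindLoop, hpast]
      constructor
      · intro h; exact absurd h (by simp)
      · rintro ⟨i, hki, him, _⟩; exfalso; omega

lemma pvA_iff (name token : String) :
    contains_token name token = true ↔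
      pvQ (PySem.Chars.lower name.toList) (PySem.Chars.lower token.toList) := by
  set lower := PySem.Chars.lower name.toList with hl
  set tok := PySem.Chars.lower token.toList with ht
  show pvFindLoop lower tok (lower.length + 2) 0 = true ↔ _
  rw [show (0 : Int) = ((0 : Nat) : Int) from rfl,
      pvLoop_iff lower tok (lower.length + 2) 0 (by omega)]
  unfold pvQ
  exact ⟨fun ⟨i, _, h2, h3⟩ => ⟨i, h2, h3⟩, fun ⟨i, h2, h3⟩ => ⟨i, Nat.zero_le _, h2, h3⟩⟩

-- ===== VERDICT (by name: the statement is the Claim_ definition above) =====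
theorem contains_token_spec : Claim_equal_contains_token := by
  intro name token _
  unfold Spec_contains_token
  rw [Bool.eq_iff_iff]
  exact (pvA_iff name token).trans (pvAlt_iff name token).symm
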